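-- pv_equiv track=rewrite | github.com/PaddlePaddle/PaddleNLP | legacy/model_zoo/uie/utils.py | get_dynamic_max_length
-- ===== SOURCE A (Python) =====
-- from typing import List, Optional
--
-- def get_dynamic_max_length(examples, default_max_length: int, dynamic_max_length: List[int]) -> int:
--     """get max_length by examples which you can change it by examples in batch"""
--     cur_length = len(examples[0]["input_ids"])
--     max_length = default_max_length
--     for max_length_option in sorted(dynamic_max_length):
--         if cur_length <= max_length_option:
--             max_length = max_length_option
--             break
--     return max_length
-- ===== SOURCE B (Python) =====
-- def get_dynamic_max_length(examples, default_max_length: int, dynamic_max_length):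
--     """get max_length by examples which you can change it by examples in batch"""
--     cur_length = len(examples[0]["input_ids"])
--     candidates = [x for x in dynamic_max_length if x >= cur_length]
--     return min(candidates) if candidates else default_max_length
-- ===== Notes on version B (the rewrite author's own statement) =====
-- stated objective: simpler
-- what changed: Replaces sort-then-ordered-scan-with-break by a single filter of the qualifying lengths and min() with the default when none qualify.
import Mathlib
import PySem

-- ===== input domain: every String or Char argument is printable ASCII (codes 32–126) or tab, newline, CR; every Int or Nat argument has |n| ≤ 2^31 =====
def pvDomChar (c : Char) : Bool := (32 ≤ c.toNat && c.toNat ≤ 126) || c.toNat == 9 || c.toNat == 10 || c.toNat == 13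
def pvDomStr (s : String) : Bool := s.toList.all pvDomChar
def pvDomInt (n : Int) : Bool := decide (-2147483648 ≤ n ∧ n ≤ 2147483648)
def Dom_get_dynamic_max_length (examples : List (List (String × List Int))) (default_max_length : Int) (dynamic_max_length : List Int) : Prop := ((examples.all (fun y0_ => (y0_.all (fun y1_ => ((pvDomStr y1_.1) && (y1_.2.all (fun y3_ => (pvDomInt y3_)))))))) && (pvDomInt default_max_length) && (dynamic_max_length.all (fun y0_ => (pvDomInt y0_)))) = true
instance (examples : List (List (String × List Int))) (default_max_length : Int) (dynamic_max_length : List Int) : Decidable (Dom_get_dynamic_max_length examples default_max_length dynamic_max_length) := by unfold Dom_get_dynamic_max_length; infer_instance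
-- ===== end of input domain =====

-- B replaces A's sort-then-ordered-scan-with-break by filtering the qualifying lengths and taking their minimum (simpler).


-- ===== PORT A =====
def pvLoopA (cur d : Int) : List Int → Int
  | [] => d
  | x :: rest => if cur ≤ x then x else pvLoopA cur d rest

def get_dynamic_max_length (examples : List (List (String × List Int))) (default_max_length : Int) (dynamic_max_length : List Int) : Int :=
  match examples.head? >>= (fun e => e.lookup "input_ids") with
  | none => 0  -- unreachable under Pre_ (Python raises IndexError/KeyError here)
  | some ids =>
    let cur_length : Int := (ids.length : Int)
    pvLoopA cur_length default_max_length (PySem.List.sorted dynamic_max_length (fun x => x) false)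


-- ===== PORT B =====
def get_dynamic_max_length_alt (examples : List (List (String × List Int))) (default_max_length : Int) (dynamic_max_length : List Int) : Int :=
  match examples.head? >>= (fun e => e.lookup "input_ids") with
  | none => 0  -- unreachable under Pre_ (Python raises IndexError/KeyError here)
  | some ids =>
    let cur_length : Int := (ids.length : Int)
    let candidates := dynamic_max_length.filter (fun x => cur_length ≤ x)
    match PySem.List.min? candidates (fun x => x) with
    | none => default_max_length
    | some m => m


-- ===== PRECONDITION & SPEC =====
-- Pre_: A raises IndexError on empty examples and KeyError when the first example lacks "input_ids"; B raises there too.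
def Pre_get_dynamic_max_length (examples : List (List (String × List Int))) (default_max_length : Int) (dynamic_max_length : List Int) : Prop :=
  (examples.head? >>= (fun e => e.lookup "input_ids")).isSome
instance (examples : List (List (String × List Int))) (default_max_length : Int) (dynamic_max_length : List Int) : Decidable (Pre_get_dynamic_max_length examples default_max_length dynamic_max_length) := by unfold Pre_get_dynamic_max_length; infer_instance
def pvWitness_get_dynamic_max_length : (List (List (String × List Int))) × Int × List Int := ([[("input_ids", [1, 2])]], 8, [4, 2])
def Spec_get_dynamic_max_length (examples : List (List (String × List Int))) (default_max_length : Int) (dynamic_max_length : List Int) (out : Int) : Prop := out = get_dynamic_max_length_alt examples default_max_length dynamic_max_length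
instance (examples : List (List (String × List Int))) (default_max_length : Int) (dynamic_max_length : List Int) (out : Int) : Decidable (Spec_get_dynamic_max_length examples default_max_length dynamic_max_length out) := by unfold Spec_get_dynamic_max_length; infer_instance

-- ===== CLAIM (what is proved, stated in full; the proofs are below) =====
def Claim_equal_get_dynamic_max_length : Prop := ∀ (examples : List (List (String × List Int))) (default_max_length : Int) (dynamic_max_length : List Int), Dom_get_dynamic_max_length examples default_max_length dynamic_max_length → Pre_get_dynamic_max_length examples default_max_length dynamic_max_length → Spec_get_dynamic_max_length examples default_max_length dynamic_max_length (get_dynamic_max_length examples default_max_length dynamic_max_length)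

-- ===== LEMMAS AND PROOFS =====

theorem pvLoopA_eq_filter_head (cur d : Int) (l : List Int) :
    pvLoopA cur d l = (l.filter (fun x => cur ≤ x)).headD d := by
  induction l with
  | nil => rfl
  | cons x t ih =>
    simp only [pvLoopA, List.filter_cons]
    by_cases h : cur ≤ x <;> simp [h, ih]

theorem pv_key (cur d : Int) (l : List Int) :
    pvLoopA cur d (PySem.List.sorted l (fun x => x) false) =
      match PySem.List.min? (l.filter (fun x => cur ≤ x)) (fun x => x) with
      | none => d
      | some m => m := by
  rw [pvLoopA_eq_filter_head]
  have hperm : ((PySem.List.sorted l (fun x => x) false).filter (fun x => cur ≤ x)).Perm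
      (l.filter (fun x => cur ≤ x)) := (PySem.List.sorted_perm l _ false).filter _
  have hpw : ((PySem.List.sorted l (fun x => x) false).filter (fun x => cur ≤ x)).Pairwise (· ≤ ·) :=
    (PySem.List.sorted_pairwise l (fun x => x)).filter _
  cases hs : (PySem.List.sorted l (fun x => x) false).filter (fun x => cur ≤ x) with
  | nil =>
    have : l.filter (fun x => cur ≤ x) = [] := (List.Perm.nil_eq (hs ▸ hperm)).symm
    simp [this, PySem.List.min?]
  | cons h t =>
    have hne : l.filter (fun x => cur ≤ x) ≠ [] := by
      intro hnil
      rw [hs, hnil] at hperm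
      exact absurd hperm.length_eq (by simp)
    cases hm : PySem.List.min? (l.filter (fun x => cur ≤ x)) (fun x => x) with
    | none => exact absurd ((PySem.List.min?_eq_none_iff _ _).mp hm) hne
    | some m =>
      simp only [List.headD_cons]
      have hmem : h ∈ l.filter (fun x => cur ≤ x) := hperm.mem_iff.mp (hs ▸ List.mem_cons_self)
      have h1 : m ≤ h := PySem.List.min?_isMin hm h hmem
      have hmmem : m ∈ (PySem.List.sorted l (fun x => x) false).filter (fun x => cur ≤ x) :=
        hperm.mem_iff.mpr (PySem.List.min?_mem hm)
      rw [hs] at hmmem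
      have h2 : h ≤ m := by
        rcases List.mem_cons.mp hmmem with rfl | hmt
        · exact le_refl _
        · exact List.rel_of_pairwise_cons (hs ▸ hpw) hmt
      omega

-- ===== VERDICT (by name: the statement is the Claim_ definition above) =====
theorem get_dynamic_max_length_spec : Claim_equal_get_dynamic_max_length := by
  intro examples default_max_length dynamic_max_length _ hpre
  unfold Spec_get_dynamic_max_length get_dynamic_max_length get_dynamic_max_length_alt
  cases hl : examples.head? >>= (fun e => e.lookup "input_ids") with
  | none => exact absurd hpre (by simp [Pre_get_dynamic_max_length, hl])
  | some ids => simpa using pv_key (ids.length : Int) default_max_length dynamic_max_length
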